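-- pv_equiv track=rewrite | github.com/kckevinchenzkk/ML-Material | patent_based_model.py | create_parameter_based_labels
-- ===== SOURCE A (Python) =====
-- def create_parameter_based_labels(parameters):
--     """
--     Create labels based on parameter similarity following patent methodology
--     Groups materials with similar physical properties using broader ranges
--     """
--     param_labels = []
--
--     for params in parameters:
--         # Create broader groupings for better class balance
--         # Based on patent findings about parameter importance
--
--         # Group 弯曲强度 (most significant) into broader ranges
--         if params[0] <= 25:
--             bending_group = "Low"      # 0-25
--         elif params[0] <= 50:
--             bending_group = "Medium"   # 26-50
--         elif params[0] <= 75: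
--             bending_group = "High"     # 51-75
--         else:
--             bending_group = "VeryHigh" # 76-100
--
--         # Group 强度 (moderately significant)
--         if params[1] <= 40:
--             strength_group = "Low"     # 0-40
--         elif params[1] <= 70:
--             strength_group = "Medium"  # 41-70
--         else:
--             strength_group = "High"    # 71-100
--
--         # Group 形变强度 (moderately significant)
--         if params[2] <= 30:
--             deform_strength_group = "Low"    # 0-30
--         elif params[2] <= 50:
--             deform_strength_group = "Medium" # 31-50
--         else:
--             deform_strength_group = "High"   # 51-100
--
--         # Group 形变率 (not significant) - broader groups
--         if params[3] <= 50:
--             deform_rate_group = "Low"   # 0-50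
--         else:
--             deform_rate_group = "High"  # 51-100
--
--         # Create composite label focusing on most important parameters
--         param_label = f"Bend_{bending_group}_Str_{strength_group}_DefStr_{deform_strength_group}_DefRate_{deform_rate_group}"
--         param_labels.append(param_label)
--
--     return param_labels
-- ===== SOURCE B (Python) =====
-- _SPEC = [
--     ("Bend", [25, 50, 75], ["Low", "Medium", "High", "VeryHigh"]),
--     ("Str", [40, 70], ["Low", "Medium", "High"]),
--     ("DefStr", [30, 50], ["Low", "Medium", "High"]),
--     ("DefRate", [50], ["Low", "High"]),
-- ]
--
--
-- def create_parameter_based_labels(parameters):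
--     out = []
--     for params in parameters:
--         parts = []
--         for i, (name, thresholds, labels) in enumerate(_SPEC):
--             idx = sum(1 for t in thresholds if t < params[i])
--             parts.append(f"{name}_{labels[idx]}")
--         out.append("_".join(parts))
--     return out
-- ===== Notes on version B (the rewrite author's own statement) =====
-- stated objective: simpler
-- what changed: Replaces the four hard-coded if/elif cascades with one data table of (name, thresholds, labels) triples and a single generic bucketing loop (bucket index = number of thresholds strictly below the value), joining the parts instead of one big f-string.
import Mathlib
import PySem

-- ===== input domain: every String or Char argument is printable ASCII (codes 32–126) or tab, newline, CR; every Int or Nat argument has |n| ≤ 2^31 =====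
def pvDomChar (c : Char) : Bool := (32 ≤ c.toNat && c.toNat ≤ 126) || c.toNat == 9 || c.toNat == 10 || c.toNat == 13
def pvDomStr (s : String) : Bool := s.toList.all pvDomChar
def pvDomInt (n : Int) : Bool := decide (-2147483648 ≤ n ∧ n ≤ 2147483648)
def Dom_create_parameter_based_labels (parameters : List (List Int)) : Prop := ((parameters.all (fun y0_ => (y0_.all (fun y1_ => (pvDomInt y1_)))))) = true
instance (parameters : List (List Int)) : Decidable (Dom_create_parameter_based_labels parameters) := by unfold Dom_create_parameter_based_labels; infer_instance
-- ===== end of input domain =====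

-- B replaces A's four hard-coded if/elif cascades by one table of (name, thresholds, labels)
-- triples and a single generic bucketing loop (objective: simpler).

-- ===== PORT A =====
-- one iteration of A's loop body: the four if/elif cascades and the f-string
def pvLabelA (params : List Int) : String :=
  let p0 := (PySem.List.pyGet? params 0).getD 0
  let p1 := (PySem.List.pyGet? params 1).getD 0
  let p2 := (PySem.List.pyGet? params 2).getD 0
  let p3 := (PySem.List.pyGet? params 3).getD 0
  let bending_group := if p0 ≤ 25 then "Low" else if p0 ≤ 50 then "Medium" else if p0 ≤ 75 then "High" else "VeryHigh"
  let strength_group := if p1 ≤ 40 then "Low" else if p1 ≤ 70 then "Medium" else "High"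
  let deform_strength_group := if p2 ≤ 30 then "Low" else if p2 ≤ 50 then "Medium" else "High"
  let deform_rate_group := if p3 ≤ 50 then "Low" else "High"
  "Bend_" ++ bending_group ++ "_Str_" ++ strength_group ++ "_DefStr_" ++ deform_strength_group ++ "_DefRate_" ++ deform_rate_group

def create_parameter_based_labels (parameters : List (List Int)) : List String :=
  parameters.foldl (fun param_labels params => param_labels ++ [pvLabelA params]) []

-- ===== PORT B =====
def pvSpec : List (String × List Int × List String) :=
  [("Bend", ([25, 50, 75], ["Low", "Medium", "High", "VeryHigh"])),
   ("Str", ([40, 70], ["Low", "Medium", "High"])),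
   ("DefStr", ([30, 50], ["Low", "Medium", "High"])),
   ("DefRate", ([50], ["Low", "High"]))]

-- one iteration of B's outer loop: the inner loop over the spec table, then the join
def pvLabelB (params : List Int) : String :=
  PySem.Str.join "_"
    ((PySem.List.enumerate pvSpec).foldl (fun parts ispec =>
      let i := ispec.1
      let name := ispec.2.1
      let thresholds := ispec.2.2.1
      let labels := ispec.2.2.2
      let p := (PySem.List.pyGet? params i).getD 0
      let idx := (thresholds.filter (fun t => t < p)).length
      parts ++ [name ++ "_" ++ ((PySem.List.pyGet? labels (idx : Int)).getD "")]) [])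

def create_parameter_based_labels_alt (parameters : List (List Int)) : List String :=
  parameters.foldl (fun out params => out ++ [pvLabelB params]) []

-- ===== PRECONDITION & SPEC =====
-- A does params[0]..params[3]: it raises IndexError on any inner list shorter than 4 (B raises there too).
def Pre_create_parameter_based_labels (parameters : List (List Int)) : Prop :=
  ∀ ps ∈ parameters, 4 ≤ ps.length
instance (parameters : List (List Int)) : Decidable (Pre_create_parameter_based_labels parameters) := by unfold Pre_create_parameter_based_labels; infer_instance
def pvWitness_create_parameter_based_labels : List (List Int) := [[10, 45, 55, 60], [80, 80, 20, 20]]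

def Spec_create_parameter_based_labels (parameters : List (List Int)) (out : List String) : Prop := out = create_parameter_based_labels_alt parameters
instance (parameters : List (List Int)) (out : List String) : Decidable (Spec_create_parameter_based_labels parameters out) := by unfold Spec_create_parameter_based_labels; infer_instance

-- ===== CLAIM (what is proved, stated in full; the proofs are below) =====
def Claim_equal_create_parameter_based_labels : Prop := ∀ (parameters : List (List Int)), Dom_create_parameter_based_labels parameters → Pre_create_parameter_based_labels parameters → Spec_create_parameter_based_labels parameters (create_parameter_based_labels parameters)

-- ===== LEMMAS AND PROOFS =====

-- generic join-of-four, via the Chars bridge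
lemma join_four (s1 s2 s3 s4 : String) :
    PySem.Str.join "_" [s1, s2, s3, s4] = s1 ++ "_" ++ s2 ++ "_" ++ s3 ++ "_" ++ s4 := by
  apply String.ext
  simp [PySem.Str.toList_join, PySem.Chars.join_cons_cons, PySem.Chars.join_singleton]

lemma bucket0 (a : Int) :
    (PySem.List.pyGet? ["Low", "Medium", "High", "VeryHigh"]
      (((([25, 50, 75] : List Int).filter (fun t => t < a)).length : Int))).getD ""
    = (if a ≤ 25 then "Low" else if a ≤ 50 then "Medium" else if a ≤ 75 then "High" else "VeryHigh") := by
  simp only [List.filter_cons, List.filter_nil]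
  split_ifs <;> simp_all [PySem.List.pyGet?, PySem.List.pyIdx?] <;> omega

lemma bucket1 (a : Int) :
    (PySem.List.pyGet? ["Low", "Medium", "High"]
      (((([40, 70] : List Int).filter (fun t => t < a)).length : Int))).getD ""
    = (if a ≤ 40 then "Low" else if a ≤ 70 then "Medium" else "High") := by
  simp only [List.filter_cons, List.filter_nil]
  split_ifs <;> simp_all [PySem.List.pyGet?, PySem.List.pyIdx?] <;> omega

lemma bucket2 (a : Int) :
    (PySem.List.pyGet? ["Low", "Medium", "High"]
      (((([30, 50] : List Int).filter (fun t => t < a)).length : Int))).getD ""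
    = (if a ≤ 30 then "Low" else if a ≤ 50 then "Medium" else "High") := by
  simp only [List.filter_cons, List.filter_nil]
  split_ifs <;> simp_all [PySem.List.pyGet?, PySem.List.pyIdx?] <;> omega

lemma bucket3 (a : Int) :
    (PySem.List.pyGet? ["Low", "High"]
      (((([50] : List Int).filter (fun t => t < a)).length : Int))).getD ""
    = (if a ≤ 50 then "Low" else "High") := by
  simp only [List.filter_cons, List.filter_nil]
  split_ifs <;> simp_all [PySem.List.pyGet?, PySem.List.pyIdx?] <;> omega

lemma label_eq (params : List Int) (h : 4 ≤ params.length) : pvLabelA params = pvLabelB params := by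
  match params, h with
  | a :: b :: c :: d :: rest, _ =>
    simp only [pvLabelB, pvSpec, PySem.List.enumerate, List.foldl, pvLabelA,
      List.nil_append, List.cons_append]
    rw [join_four]
    have g : ∀ (i : Int) (x : Int), i = 0 ∧ x = a ∨ i = 1 ∧ x = b ∨ i = 2 ∧ x = c ∨ i = 3 ∧ x = d →
        PySem.List.pyGet? (a :: b :: c :: d :: rest) i = some x := by
      rintro i x (⟨rfl, rfl⟩ | ⟨rfl, rfl⟩ | ⟨rfl, rfl⟩ | ⟨rfl, rfl⟩) <;>
        (simp [PySem.List.pyGet?, PySem.List.pyIdx?]; rw [if_pos (by omega)]; rfl)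
    simp only [show ((0:Int) + 1) = 1 from rfl, show ((1:Int) + 1) = 2 from rfl,
      show ((2:Int) + 1) = 3 from rfl,
      g 0 a (by simp), g 1 b (by simp), g 2 c (by simp), g 3 d (by simp),
      Option.getD_some, bucket0, bucket1, bucket2, bucket3]
    apply String.ext
    simp [List.append_assoc]

lemma foldl_append_singleton {α β : Type} (f : α → β) (xs : List α) (acc : List β) :
    xs.foldl (fun out x => out ++ [f x]) acc = acc ++ xs.map f := by
  induction xs generalizing acc with
  | nil => simp
  | cons x xs ih => simp [List.foldl, ih]

-- ===== VERDICT (by name: the statement is the Claim_ definition above) =====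
theorem create_parameter_based_labels_spec : Claim_equal_create_parameter_based_labels := by
  intro parameters _ hpre
  unfold Spec_create_parameter_based_labels create_parameter_based_labels create_parameter_based_labels_alt
  rw [foldl_append_singleton, foldl_append_singleton]
  simp only [List.nil_append]
  exact List.map_congr_left (fun ps hps => label_eq ps (hpre ps hps))
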